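-- pv_equiv track=rewrite | github.com/mave-11/automata_practical_exam_4405 | DFA_div_3.py | precond_dfa
-- ===== SOURCE A (Python) =====
-- def precond_dfa(str):
--     state = 'q0'
--     for sym in str:
--         match state:
--             case 'q0': state = 'q1' if sym == '1' else 'q0'
--             case 'q1': state = 'q2' if sym == '1' else 'q1'
--             case 'q2': state = 'q3' if sym == '1' else 'q2'
--             case 'q3': state = 'q1' if sym == '1' else 'q3'
--     return state == 'q3'
-- ===== SOURCE B (Python) =====
-- def precond_dfa(str):
--     c = sum(1 for sym in str if sym == '1')
--     return c != 0 and c % 3 == 0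
-- ===== Notes on version B (the rewrite author's own statement) =====
-- stated objective: simpler
-- what changed: Replaces the explicit 4-state transition machine with a one-pass count of '1' symbols and the closed-form test c != 0 and c % 3 == 0.
import Mathlib
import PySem

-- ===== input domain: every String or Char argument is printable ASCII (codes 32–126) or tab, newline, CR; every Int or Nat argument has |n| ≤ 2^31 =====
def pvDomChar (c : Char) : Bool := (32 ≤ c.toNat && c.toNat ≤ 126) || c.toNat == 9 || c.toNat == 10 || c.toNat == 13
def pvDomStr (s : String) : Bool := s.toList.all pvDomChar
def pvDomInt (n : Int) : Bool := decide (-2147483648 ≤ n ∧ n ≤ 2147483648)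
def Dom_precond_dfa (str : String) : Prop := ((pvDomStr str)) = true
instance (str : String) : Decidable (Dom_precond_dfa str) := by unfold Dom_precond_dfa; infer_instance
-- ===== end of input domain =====

-- B replaces the explicit 4-state transition machine with a one-pass count of '1's
-- and the closed-form test c ≠ 0 ∧ c % 3 = 0 (objective: simpler).

-- ===== PORT A =====
-- one step of A's match statement
def pvStep (state : String) (sym : Char) : String :=
  if state = "q0" then (if sym = '1' then "q1" else "q0")
  else if state = "q1" then (if sym = '1' then "q2" else "q1")
  else if state = "q2" then (if sym = '1' then "q3" else "q2")
  else if state = "q3" then (if sym = '1' then "q1" else "q3")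
  else state

def precond_dfa (str : String) : Bool :=
  (str.toList.foldl pvStep "q0") = "q3"

-- ===== PORT B =====
def precond_dfa_alt (str : String) : Bool :=
  let c : Int := str.toList.foldl (fun acc sym => if sym = '1' then acc + 1 else acc) 0
  c ≠ 0 && c % 3 = 0

-- ===== PRECONDITION & SPEC =====
def Spec_precond_dfa (str : String) (out : Bool) : Prop := out = precond_dfa_alt str
instance (str : String) (out : Bool) : Decidable (Spec_precond_dfa str out) := by unfold Spec_precond_dfa; infer_instance

-- ===== CLAIM (what is proved, stated in full; the proofs are below) =====
def Claim_equal_precond_dfa : Prop := ∀ (str : String), Dom_precond_dfa str → Spec_precond_dfa str (precond_dfa str)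

-- ===== LEMMAS AND PROOFS =====

-- the DFA state as a function of the number of '1's seen so far
def pvStateOf (c : Int) : String :=
  if c = 0 then "q0"
  else if c % 3 = 1 then "q1"
  else if c % 3 = 2 then "q2"
  else "q3"

theorem pvStep_stateOf (c : Int) (hc : 0 ≤ c) (sym : Char) :
    pvStep (pvStateOf c) sym = pvStateOf (if sym = '1' then c + 1 else c) := by
  by_cases h1 : sym = '1'
  · simp only [h1]
    unfold pvStateOf pvStep
    rcases eq_or_lt_of_le hc with h0 | h0
    · simp [← h0]
    · have h0' : c ≠ 0 := by omega
      have : c % 3 = 0 ∨ c % 3 = 1 ∨ c % 3 = 2 := by omega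
      rcases this with h | h | h <;> simp [h0', h] <;> split_ifs <;> simp_all <;> omega
  · unfold pvStep pvStateOf
    simp only [h1]
    split_ifs <;> simp_all

theorem pvFold_stateOf (l : List Char) (c : Int) (hc : 0 ≤ c) :
    l.foldl pvStep (pvStateOf c) =
      pvStateOf (l.foldl (fun acc sym => if sym = '1' then acc + 1 else acc) c) := by
  induction l generalizing c with
  | nil => rfl
  | cons x xs ih =>
      simp only [List.foldl_cons, pvStep_stateOf c hc x]
      exact ih _ (by split_ifs <;> omega)

theorem pvCount_nonneg (l : List Char) (c : Int) (hc : 0 ≤ c) :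
    0 ≤ l.foldl (fun acc sym => if sym = '1' then acc + 1 else acc) c := by
  induction l generalizing c with
  | nil => exact hc
  | cons x xs ih => exact ih _ (by simp only []; split_ifs <;> omega)

-- ===== VERDICT (by name: the statement is the Claim_ definition above) =====
theorem precond_dfa_spec : Claim_equal_precond_dfa := by
  intro str _
  unfold Spec_precond_dfa precond_dfa precond_dfa_alt
  have h := pvFold_stateOf str.toList 0 le_rfl
  have hq0 : pvStateOf 0 = "q0" := rfl
  rw [hq0] at h
  rw [h]
  set c := str.toList.foldl (fun acc sym => if sym = '1' then acc + 1 else acc) (0 : Int) with hc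
  have hnn : 0 ≤ c := pvCount_nonneg str.toList 0 le_rfl
  unfold pvStateOf
  have : c % 3 = 0 ∨ c % 3 = 1 ∨ c % 3 = 2 := by omega
  by_cases h0 : c = 0
  · simp [h0]
  · rcases this with h | h | h <;> simp [h0, h]
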